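-- pv_equiv track=rewrite | github.com/mbits-libs/git2-cxx | tools/release.py | get_commit
-- ===== SOURCE A (Python) =====
-- from typing import Dict, List, NamedTuple, Tuple
--
-- class Commit(NamedTuple):
--     type: str
--     scope: str
--     summary: str
--     hash: str
--     short_hash: str
--     is_breaking: bool
--     breaking_message: List[str] = []
--     references: Dict[str, List[str]] = {}
--
-- def get_commit(hash: str, short_hash: str, message: str) -> Commit:
--     subject, body = (message + "\n\n").split("\n\n", 1)
--     split = subject.split(": ", 1)
--     if len(split) != 2:
--         return None
--
--     encoded, summary = split
--     encoded = encoded.strip()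
--     is_breaking = len(encoded) and encoded[-1] == "!"
--     if is_breaking:
--         encoded = encoded[:-1].rstrip()
--     type_scope = encoded.split("(", 1)
--     if not len(type_scope[0]):
--         return None
--     scope = ""
--     if len(type_scope) == 2:
--         scope = ")".join(type_scope[1].split(")")[:-1]).strip()
--
--     breaking_change = None
--     refs = []
--     closes = []
--     body = body.strip().split("BREAKING CHANGE:", 1)
--     if len(body) > 1:
--         breaking_change = [para.strip() for para in body[1].strip().split("\n\n")]
--
--     lines = body[0].strip().split("\n")
--     for index_plus_1 in range(len(lines), 0, -1):
--         index = index_plus_1 - 1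
--         footer_line = lines[index].strip()
--         if footer_line == "":
--             continue
--         footer = footer_line.split(": ", 1)
--         if len(footer) == 1:
--             break
--         name = footer[0].strip().lower()
--         if name in ["refs", "closes"]:
--             items = [v.strip() for v in footer[1].split(",")]
--             if name == "refs":
--                 refs = items + refs
--             else:
--                 closes = items + closes
--             continue
--
--     references = {}
--
--     if len(refs):
--         references["references"] = refs
--     if len(closes):
--         references["closes"] = closes
--
--     return Commit(
--         type_scope[0].strip(),
--         scope,
--         summary,
--         hash,
--         short_hash,
--         is_breaking,
--         breaking_change,
--         references,
--     )
-- ===== SOURCE B (Python) =====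
-- def get_commit(hash: str, short_hash: str, message: str):
--     from typing import Dict, List, NamedTuple
--
--     class Commit(NamedTuple):
--         type: str
--         scope: str
--         summary: str
--         hash: str
--         short_hash: str
--         is_breaking: bool
--         breaking_message: List[str] = []
--         references: Dict[str, List[str]] = {}
--
--     text = message + "\n\n"
--     nl = text.find("\n\n")
--     subject, body = text[:nl], text[nl + 2:]
--
--     sep = subject.find(": ")
--     if sep < 0:
--         return None
--     head = subject[:sep].strip()
--     summary = subject[sep + 2:]
--
--     is_breaking = head.endswith("!")
--     if is_breaking:
--         head = head[:-1].rstrip()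
--
--     lp = head.find("(")
--     rp = head.rfind(")")
--     ctype = head if lp < 0 else head[:lp]
--     if not ctype:
--         return None
--     scope = head[lp + 1:rp].strip() if 0 <= lp < rp else ""
--
--     bc = body.strip()
--     k = bc.find("BREAKING CHANGE:")
--     if k < 0:
--         breaking_change, pre = None, bc
--     else:
--         breaking_change = [p.strip() for p in bc[k + 16:].strip().split("\n\n")]
--         pre = bc[:k]
--
--     # one forward pass: a non-blank line without ': ' resets the tallies, so
--     # exactly the trailing footer block contributes (no reverse scan needed)
--     refs = []
--     closes = []
--     for line in pre.strip().split("\n"):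
--         t = line.strip()
--         if not t:
--             continue
--         i = t.find(": ")
--         if i < 0:
--             refs, closes = [], []
--             continue
--         name = t[:i].strip().lower()
--         if name == "refs":
--             refs = refs + [v.strip() for v in t[i + 2:].split(",")]
--         elif name == "closes":
--             closes = closes + [v.strip() for v in t[i + 2:].split(",")]
--
--     references = {}
--     if refs:
--         references["references"] = refs
--     if closes:
--         references["closes"] = closes
--
--     return Commit(ctype.strip(), scope, summary, hash, short_hash, is_breaking,
--                   breaking_change, references)
-- ===== Notes on version B (the rewrite author's own statement) =====
-- stated objective: alternative
-- what changed: B replaces A's backwards footer loop (reverse index range, break at the first bad line, prepend items) with a single forward fold whose state is reset whenever a non-blank line lacks ': ' (so only the trailing footer block survives), and parses the subject by index arithmetic (find of ': ' and '(', rfind of ')' with one slice head[lp+1:rp]) instead of A's split/join/slice chains.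
import Mathlib
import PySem

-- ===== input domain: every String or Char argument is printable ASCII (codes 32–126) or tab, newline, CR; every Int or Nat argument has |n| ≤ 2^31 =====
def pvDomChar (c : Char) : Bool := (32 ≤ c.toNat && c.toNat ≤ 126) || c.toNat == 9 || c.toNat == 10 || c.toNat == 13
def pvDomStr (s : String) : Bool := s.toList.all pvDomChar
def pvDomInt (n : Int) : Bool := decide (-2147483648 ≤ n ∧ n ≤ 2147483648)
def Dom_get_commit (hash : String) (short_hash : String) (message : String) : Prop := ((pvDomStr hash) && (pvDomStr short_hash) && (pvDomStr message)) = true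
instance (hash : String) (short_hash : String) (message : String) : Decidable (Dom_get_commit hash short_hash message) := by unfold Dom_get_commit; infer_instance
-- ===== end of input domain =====

-- B parses the subject by index arithmetic (find/rfind and slices) instead of split/join chains, and
-- replaces the backwards footer loop by a single forward fold that resets on a non-footer line;
-- objective: an alternative algorithm with the same exact behaviour.

-- ===== PORT A =====
-- the reversed footer loop of A ('for index_plus_1 in range(len(lines), 0, -1)'), with break = returning st
def footA (lines : List (List Char)) : List Int → List (List Char) × List (List Char) → List (List Char) × List (List Char)
  | [], st => st
  | i :: is, st =>
    let footer_line := PySem.Chars.strip (PySem.List.pyGetD lines (i - 1) [])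
    if footer_line.length = 0 then footA lines is st
    else
      let footer := PySem.Chars.splitOnMax footer_line [':', ' '] 1
      if footer.length = 1 then st
      else
        let name := PySem.Chars.lower (PySem.Chars.strip (PySem.List.pyGetD footer 0 []))
        if name = ['r','e','f','s'] ∨ name = ['c','l','o','s','e','s'] then
          let items := (PySem.Chars.splitOn (PySem.List.pyGetD footer 1 []) [',']).map PySem.Chars.strip
          if name = ['r','e','f','s'] then footA lines is (items ++ st.1, st.2)
          else footA lines is (st.1, items ++ st.2)
        else footA lines is st

def get_commit (hash : String) (short_hash : String) (message : String) : Option (String × String × String × String × String × Bool × Option (List String) × (List (String × List String))) :=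
  -- (message + "\n\n").split("\n\n", 1): the separator is a nonempty literal, so .split is exactly splitOnMax
  let parts := PySem.Chars.splitOnMax (message.toList ++ ['\n','\n']) ['\n','\n'] 1
  -- 'subject, body = parts' : tuple unpack of a list that always has exactly two pieces ("\n\n" occurs in message + "\n\n")
  let subject := PySem.List.pyGetD parts 0 []
  let body := PySem.List.pyGetD parts 1 []
  (
    let split := PySem.Chars.splitOnMax subject [':', ' '] 1
    if split.length ≠ 2 then none
    else
      let encoded := PySem.Chars.strip (PySem.List.pyGetD split 0 [])
      let summary := PySem.List.pyGetD split 1 []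
      let is_breaking := (decide (encoded.length ≠ 0)) && (PySem.List.pyGet? encoded (-1) == some '!')
      let encoded := if is_breaking then PySem.Chars.rstrip (PySem.List.slice encoded none (some (-1))) else encoded
      let type_scope := PySem.Chars.splitOnMax encoded ['('] 1
      if (PySem.List.pyGetD type_scope 0 []).length = 0 then none
      else
        let scope := if type_scope.length = 2 then
            PySem.Chars.strip (PySem.Chars.join [')'] (PySem.List.slice (PySem.Chars.splitOn (PySem.List.pyGetD type_scope 1 []) [')']) none (some (-1))))
          else []
        let body2 := PySem.Chars.splitOnMax (PySem.Chars.strip body) ['B','R','E','A','K','I','N','G',' ','C','H','A','N','G','E',':'] 1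
        let breaking_change : Option (List String) :=
          if 1 < body2.length then
            some ((PySem.Chars.splitOn (PySem.Chars.strip (PySem.List.pyGetD body2 1 [])) ['\n','\n']).map (fun p => String.ofList (PySem.Chars.strip p)))
          else none
        let lines := PySem.Chars.splitOn (PySem.Chars.strip (PySem.List.pyGetD body2 0 [])) ['\n']
        let rc := footA lines (PySem.List.pyRange (lines.length : Int) 0 (-1)) ([], [])
        -- dict with two distinct literal keys, built once: insertion order = references, closes
        let references : PySem.Dict String (List String) := PySem.Dict.empty
        let references := if rc.1.length ≠ 0 then references.insert "references" (rc.1.map String.ofList) else references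
        let references := if rc.2.length ≠ 0 then references.insert "closes" (rc.2.map String.ofList) else references
        some (String.ofList (PySem.Chars.strip (PySem.List.pyGetD type_scope 0 [])), String.ofList scope, String.ofList summary,
              hash, short_hash, is_breaking, breaking_change, references.items))

-- ===== PORT B =====
-- hand port of str.rfind for a single-character needle: index of the LAST occurrence via find on the
-- reversed string, -1 if absent (exact)
def rfindB (s : List Char) (c : Char) : Int :=
  let i := PySem.Chars.find s.reverse [c]
  if i = -1 then -1 else (s.length : Int) - 1 - i

-- the body of Source B's single forward footer loop: blank line skipped, line without ': ' RESETS the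
-- tallies, refs/closes lines append their items (t[:i], t[i+2:] are Python slices at nonnegative indices)
def stepF (st : List (List Char) × List (List Char)) (line : List Char) : List (List Char) × List (List Char) :=
  let t := PySem.Chars.strip line
  if t.length = 0 then st
  else
    let i := PySem.Chars.find t [':', ' ']
    if i < 0 then ([], [])
    else
      let name := PySem.Chars.lower (PySem.Chars.strip (t.take i.toNat))
      let items := (PySem.Chars.splitOn (t.drop (i.toNat + 2)) [',']).map PySem.Chars.strip
      if name = ['r','e','f','s'] then (st.1 ++ items, st.2)
      else if name = ['c','l','o','s','e','s'] then (st.1, st.2 ++ items)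
      else st

def get_commit_alt (hash : String) (short_hash : String) (message : String) : Option (String × String × String × String × String × Bool × Option (List String) × (List (String × List String))) :=
  let text := message.toList ++ ['\n','\n']
  -- text[:nl], text[nl+2:] with nl = text.find("\n\n") ≥ 0: Python slices at nonnegative indices
  let nl := PySem.Chars.find text ['\n','\n']
  let subject := text.take nl.toNat
  let body := text.drop (nl.toNat + 2)
  let sep := PySem.Chars.find subject [':', ' ']
  if sep < 0 then none
  else
    let head0 := PySem.Chars.strip (subject.take sep.toNat)
    let summary := subject.drop (sep.toNat + 2)
    let is_breaking := PySem.Chars.endswith head0 ['!']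
    let head := if is_breaking then PySem.Chars.rstrip (PySem.List.slice head0 none (some (-1))) else head0
    let lp := PySem.Chars.find head ['(']
    let rp := rfindB head ')'
    let ctype := if lp < 0 then head else head.take lp.toNat
    if ctype.length = 0 then none
    else
      -- head[lp+1:rp] with 0 ≤ lp+1 ≤ rp: drop then take (exact for nonnegative ordered bounds)
      let scope := if 0 ≤ lp ∧ lp < rp then PySem.Chars.strip ((head.drop (lp.toNat + 1)).take (rp.toNat - (lp.toNat + 1))) else []
      let bc := PySem.Chars.strip body
      let k := PySem.Chars.find bc ['B','R','E','A','K','I','N','G',' ','C','H','A','N','G','E',':']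
      let breaking_change : Option (List String) :=
        if k < 0 then none
        else some ((PySem.Chars.splitOn (PySem.Chars.strip (bc.drop (k.toNat + 16))) ['\n','\n']).map (fun p => String.ofList (PySem.Chars.strip p)))
      let pre := if k < 0 then bc else bc.take k.toNat
      let rc := (PySem.Chars.splitOn (PySem.Chars.strip pre) ['\n']).foldl stepF ([], [])
      let references : PySem.Dict String (List String) := PySem.Dict.empty
      let references := if rc.1.length ≠ 0 then references.insert "references" (rc.1.map String.ofList) else references
      let references := if rc.2.length ≠ 0 then references.insert "closes" (rc.2.map String.ofList) else references
      some (String.ofList (PySem.Chars.strip ctype), String.ofList scope, String.ofList summary,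
            hash, short_hash, is_breaking, breaking_change, references.items)

-- ===== PRECONDITION & SPEC =====
def Spec_get_commit (hash : String) (short_hash : String) (message : String) (out : Option (String × String × String × String × String × Bool × Option (List String) × (List (String × List String)))) : Prop := out = get_commit_alt hash short_hash message
instance (hash : String) (short_hash : String) (message : String) (out : Option (String × String × String × String × String × Bool × Option (List String) × (List (String × List String)))) : Decidable (Spec_get_commit hash short_hash message out) := by
  unfold Spec_get_commit
  haveI h3 : DecidableEq (Bool × Option (List String) × List (String × List String)) := inferInstance
  haveI h4 : DecidableEq (String × Bool × Option (List String) × List (String × List String)) := inferInstance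
  haveI h5 : DecidableEq (String × String × Bool × Option (List String) × List (String × List String)) := inferInstance
  haveI h6 : DecidableEq (String × String × String × Bool × Option (List String) × List (String × List String)) := inferInstance
  haveI h7 : DecidableEq (String × String × String × String × Bool × Option (List String) × List (String × List String)) := inferInstance
  haveI h8 : DecidableEq (String × String × String × String × String × Bool × Option (List String) × List (String × List String)) := inferInstance
  infer_instance

-- ===== CLAIM (what is proved, stated in full; the proofs are below) =====
def Claim_equal_get_commit : Prop := ∀ (hash : String) (short_hash : String) (message : String), Dom_get_commit hash short_hash message → Spec_get_commit hash short_hash message (get_commit hash short_hash message)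

-- ===== LEMMAS AND PROOFS =====

lemma findgo_shift (sub : List Char) : ∀ (l : List Char) (k : Nat),
    PySem.Chars.find.go sub l k = if PySem.Chars.find.go sub l 0 = -1 then -1 else (k : Int) + PySem.Chars.find.go sub l 0 := by
  intro l
  induction l with
  | nil =>
    intro k
    simp only [PySem.Chars.find.go]
    by_cases h : sub.isEmpty <;> simp [h]
  | cons x t ih =>
    intro k
    simp only [PySem.Chars.find.go]
    by_cases hp : sub.isPrefixOf (x :: t)
    · simp [hp]
    · simp only [hp, if_false, Bool.false_eq_true]
      have hnn : -1 ≤ PySem.Chars.find.go sub t 0 := by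
        have := PySem.Chars.neg_one_le_find t sub
        simpa [PySem.Chars.find] using this
      rw [ih (k + 1), ih 1]
      by_cases hf : PySem.Chars.find.go sub t 0 = -1
      · simp [hf]
      · have h0 : 0 ≤ PySem.Chars.find.go sub t 0 := by omega
        have h1 : ¬((1 : Int) + PySem.Chars.find.go sub t 0 = -1) := by omega
        simp only [if_neg hf]
        split_ifs with h2 <;> push_cast <;> omega

lemma find_cons (sub : List Char) (x : Char) (t : List Char) :
    PySem.Chars.find (x :: t) sub =
      if sub.isPrefixOf (x :: t) then 0
      else (if PySem.Chars.find t sub = -1 then -1 else 1 + PySem.Chars.find t sub) := by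
  show PySem.Chars.find.go sub (x :: t) 0 = _
  simp only [PySem.Chars.find.go]
  by_cases hp : sub.isPrefixOf (x :: t)
  · simp [hp]
  · simp only [hp, if_false, Bool.false_eq_true]
    rw [findgo_shift sub t 1]
    rfl

lemma find_nil (sub : List Char) (h : sub ≠ []) : PySem.Chars.find [] sub = -1 := by
  show PySem.Chars.find.go sub [] 0 = -1
  simp only [PySem.Chars.find.go]
  simp [List.isEmpty_iff, h]

lemma go_zero (sep : List Char) : ∀ (fuel : Nat) (l cur : List Char) (acc : List (List Char)),
    PySem.Chars.splitOnMax.go sep fuel 0 l cur acc = ((cur.reverse ++ l) :: acc).reverse := by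
  intro fuel l cur acc
  cases fuel with
  | zero => simp [PySem.Chars.splitOnMax.go]
  | succ f =>
    cases l with
    | nil => simp [PySem.Chars.splitOnMax.go]
    | cons c rest => simp [PySem.Chars.splitOnMax.go]

lemma go_one (sep : List Char) (hs : sep ≠ []) : ∀ (l : List Char) (fuel : Nat) (cur : List Char) (acc : List (List Char)),
    l.length < fuel →
    PySem.Chars.splitOnMax.go sep fuel 1 l cur acc =
      if PySem.Chars.find l sep = -1 then ((cur.reverse ++ l) :: acc).reverse
      else ((l.drop ((PySem.Chars.find l sep).toNat + sep.length)) :: (cur.reverse ++ l.take (PySem.Chars.find l sep).toNat) :: acc).reverse := by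
  intro l
  induction l with
  | nil =>
    intro fuel cur acc h
    cases fuel with
    | zero => omega
    | succ f =>
      have hstep : PySem.Chars.splitOnMax.go sep (f + 1) 1 [] cur acc = (cur.reverse :: acc).reverse := by
        rfl
      rw [hstep, find_nil sep hs]
      simp
  | cons x t ih =>
    intro fuel cur acc h
    cases fuel with
    | zero => omega
    | succ f =>
      have hstep : PySem.Chars.splitOnMax.go sep (f + 1) 1 (x :: t) cur acc =
          if sep.isPrefixOf (x :: t) then
            PySem.Chars.splitOnMax.go sep f 0 (List.drop sep.length (x :: t)) [] (cur.reverse :: acc)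
          else PySem.Chars.splitOnMax.go sep f 1 t (x :: cur) acc := by
        rfl
      rw [hstep]
      by_cases hp : sep.isPrefixOf (x :: t)
      · have hfc : PySem.Chars.find (x :: t) sep = 0 := by rw [find_cons sep x t, if_pos hp]
        rw [if_pos hp, go_zero, hfc]
        norm_num
      · have hfc : PySem.Chars.find (x :: t) sep =
            (if PySem.Chars.find t sep = -1 then -1 else 1 + PySem.Chars.find t sep) := by
          rw [find_cons sep x t, if_neg hp]
        rw [if_neg hp, ih f (x :: cur) acc (by simpa using Nat.lt_of_succ_lt_succ h), hfc]
        by_cases hf : PySem.Chars.find t sep = -1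
        · simp [hf]
        · have h0 : 0 ≤ PySem.Chars.find t sep := by
            have := PySem.Chars.neg_one_le_find t sep
            omega
          have h1 : ¬((1 : Int) + PySem.Chars.find t sep = -1) := by omega
          have h2 : ((1 : Int) + PySem.Chars.find t sep).toNat = (PySem.Chars.find t sep).toNat + 1 := by omega
          simp only [if_neg hf, if_neg h1, h2]
          simp [Nat.add_right_comm, List.take_succ_cons, List.drop_succ_cons]

lemma split1_eq (s sep : List Char) (hs : sep ≠ []) :
    PySem.Chars.splitOnMax s sep 1 =
      if PySem.Chars.find s sep = -1 then [s]
      else [s.take (PySem.Chars.find s sep).toNat, s.drop ((PySem.Chars.find s sep).toNat + sep.length)] := by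
  show (if (1 : Int) < 0 then _ else PySem.Chars.splitOnMax.go sep (s.length + 1) (1 : Int).toNat s [] []) = _
  rw [if_neg (by omega)]
  have : ((1 : Int)).toNat = 1 := rfl
  rw [this, go_one sep hs s (s.length + 1) [] [] (by omega)]
  split_ifs <;> simp

lemma find_append_sep (m sep : List Char) (hs : sep ≠ []) : PySem.Chars.find (m ++ sep) sep ≠ -1 := by
  rw [Ne, PySem.Chars.find_eq_neg_one_iff]
  push_neg
  exact ⟨m, [], by simp⟩

lemma breaking_eq (s : List Char) :
    ((decide (s.length ≠ 0)) && (PySem.List.pyGet? s (-1) == some '!')) = PySem.Chars.endswith s ['!'] := by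
  induction s using List.reverseRecOn with
  | nil => decide
  | append_singleton q a _ =>
    have h1 : PySem.List.pyGet? (q ++ [a]) (-1) = some a := PySem.List.pyGet?_neg_one_append_singleton q a
    simp [h1, PySem.Chars.endswith, List.isSuffixOf, List.isPrefixOf, eq_comm]

lemma find_single (c : Char) (r : List Char) [DecidablePred (· = c)] :
    PySem.Chars.find r [c] = if c ∈ r then ((r.takeWhile (fun x => x ≠ c)).length : Int) else -1 := by
  induction r with
  | nil => rw [find_nil [c] (by simp)]; simp
  | cons x t ih =>
    rw [find_cons]
    have hp : ([c].isPrefixOf (x :: t)) = (c == x) := by simp [List.isPrefixOf]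
    by_cases hxc : x = c
    · subst hxc
      simp [hp]
    · rw [hp]
      have : (c == x) = false := by simp [Ne.symm hxc]
      rw [this]
      simp only [Bool.false_eq_true, if_false, ih]
      by_cases hm : c ∈ t
      · have hne : ¬((((t.takeWhile (fun x => x ≠ c)).length : Int)) = -1) := by omega
        simp [hm, hxc, hne, List.takeWhile_cons, List.mem_cons]
        omega
      · have : ¬ (c ∈ x :: t) := by simp [hm, Ne.symm hxc]
        simp [hm, this]

-- proof-side structural form of splitOn on a single-character separator
def ssC (c : Char) : List Char → List (List Char)
  | [] => [[]]
  | x :: t => if x = c then [] :: ssC c t else (ssC c t).modifyHead (x :: ·)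

-- proof-side: everything strictly before the LAST occurrence of c in s (empty if c ∉ s)
def blC (c : Char) (s : List Char) : List Char := ((s.reverse.dropWhile (fun x => x ≠ c)).tail).reverse

lemma ss_ne_nil (c : Char) (l : List Char) : ssC c l ≠ [] := by
  induction l with
  | nil => simp [ssC]
  | cons x t ih =>
    simp only [ssC]
    split_ifs with hxc
    · simp
    · cases hss : ssC c t with
      | nil => exact absurd hss ih
      | cons h0 tl => simp [hss, List.modifyHead]

lemma ssgo (c : Char) : ∀ (l : List Char) (fuel : Nat) (cur : List Char) (acc : List (List Char)),
    l.length < fuel →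
    PySem.Chars.splitOn.go [c] fuel l cur acc = acc.reverse ++ (ssC c l).modifyHead (cur.reverse ++ ·) := by
  intro l
  induction l with
  | nil =>
    intro fuel cur acc h
    cases fuel with
    | zero => omega
    | succ f =>
      have hstep : PySem.Chars.splitOn.go [c] (f + 1) [] cur acc = (cur.reverse :: acc).reverse := by
        rfl
      rw [hstep]
      simp [ssC]
  | cons x t ih =>
    intro fuel cur acc h
    cases fuel with
    | zero => omega
    | succ f =>
      have hstep : PySem.Chars.splitOn.go [c] (f + 1) (x :: t) cur acc =
          if ([c] : List Char).isPrefixOf (x :: t) then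
            PySem.Chars.splitOn.go [c] f (List.drop ([c] : List Char).length (x :: t)) [] (cur.reverse :: acc)
          else PySem.Chars.splitOn.go [c] f t (x :: cur) acc := by
        rfl
      rw [hstep]
      have hp : (([c] : List Char).isPrefixOf (x :: t)) = (c == x) := by simp [List.isPrefixOf]
      by_cases hxc : x = c
      · subst hxc
        rw [if_pos (by simp [hp])]
        have hdrop : List.drop ([x] : List Char).length (x :: t) = t := rfl
        rw [hdrop, ih f [] (cur.reverse :: acc) (by simpa using Nat.lt_of_succ_lt_succ h)]
        simp only [ssC, if_pos rfl, List.reverse_cons, List.modifyHead, List.nil_append]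
        cases hss : ssC x t <;> simp [List.modifyHead]
      · rw [if_neg (by simp [hp]; exact Ne.symm hxc)]
        rw [ih f (x :: cur) acc (by simpa using Nat.lt_of_succ_lt_succ h)]
        simp only [ssC, if_neg hxc]
        cases hss : ssC c t with
        | nil => exact absurd hss (ss_ne_nil c t)
        | cons h0 tl => simp [hss, List.modifyHead]

lemma splitOn_single (s : List Char) (c : Char) : PySem.Chars.splitOn s [c] = ssC c s := by
  show PySem.Chars.splitOn.go [c] (s.length + 1) s [] [] = _
  rw [ssgo c s (s.length + 1) [] [] (by omega)]
  cases hss : ssC c s with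
  | nil => exact absurd hss (ss_ne_nil c s)
  | cons h0 tl => simp [List.modifyHead]

lemma ss_of_not_mem {c : Char} {s : List Char} (h : c ∉ s) : ssC c s = [s] := by
  induction s with
  | nil => rfl
  | cons x t ih =>
    have hx : ¬(x = c) := by rintro rfl; exact h (by simp)
    have ht : c ∉ t := fun hm => h (by simp [hm])
    simp [ssC, hx, ih ht, List.modifyHead]

lemma two_le_ss {c : Char} {s : List Char} (h : c ∈ s) : 2 ≤ (ssC c s).length := by
  induction s with
  | nil => simp at h
  | cons x t ih =>
    by_cases hxc : x = c
    · have h1 : ssC c t ≠ [] := ss_ne_nil c t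
      have h2 : 1 ≤ (ssC c t).length := by
        cases hss : ssC c t with
        | nil => exact absurd hss h1
        | cons a b => simp
      simp only [ssC, if_pos hxc, List.length_cons]
      omega
    · have hm : c ∈ t := by
        rcases List.mem_cons.mp h with h' | h'
        · exact absurd h'.symm hxc
        · exact h'
      simp only [ssC, if_neg hxc, List.length_modifyHead]
      exact ih hm

lemma bl_cons_of_mem {c : Char} {t : List Char} (x : Char) (h : c ∈ t) : blC c (x :: t) = x :: blC c t := by
  unfold blC
  rw [List.reverse_cons, List.dropWhile_append]
  cases hD : List.dropWhile (fun y => decide (y ≠ c)) t.reverse with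
  | nil =>
    exfalso
    have := List.dropWhile_eq_nil_iff.mp hD c (List.mem_reverse.mpr h)
    simp at this
  | cons d ds => simp [hD]

lemma bl_of_not_mem {c : Char} {s : List Char} (h : c ∉ s) : blC c s = [] := by
  unfold blC
  have hD : List.dropWhile (fun y => decide (y ≠ c)) s.reverse = [] := by
    rw [List.dropWhile_eq_nil_iff]
    intro y hy
    simp only [decide_eq_true_eq]
    rintro rfl
    exact h (List.mem_reverse.mp hy)
  rw [hD]
  rfl

lemma join_cons_head (c x : Char) (h0 : List Char) (L : List (List Char)) :
    PySem.Chars.join [c] ((x :: h0) :: L) = x :: PySem.Chars.join [c] (h0 :: L) := by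
  cases L with
  | nil => rfl
  | cons y ys => rw [PySem.Chars.join_cons_cons, PySem.Chars.join_cons_cons]; simp

lemma bl_concat_not_mem {c : Char} {t : List Char} (x : Char) (h : c ∉ t) : blC c (x :: t) = [] := by
  unfold blC
  rw [List.reverse_cons, List.dropWhile_append]
  have hD : List.dropWhile (fun y => decide (y ≠ c)) t.reverse = [] := by
    rw [List.dropWhile_eq_nil_iff]
    intro y hy
    simp only [decide_eq_true_eq]
    rintro rfl
    exact h (List.mem_reverse.mp hy)
  rw [hD]
  simp only [List.isEmpty_nil, if_pos rfl]
  by_cases hxc : x = c <;> simp [List.dropWhile, hxc]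

lemma join_dropLast_ss (c : Char) (s : List Char) : PySem.Chars.join [c] ((ssC c s).dropLast) = blC c s := by
  induction s with
  | nil => simp [ssC, blC, PySem.Chars.join_nil]
  | cons x t ih =>
    by_cases hxc : x = c
    · simp only [ssC, if_pos hxc]
      by_cases hm : c ∈ t
      · have h2 := two_le_ss hm
        cases hss : ssC c t with
        | nil => exact absurd hss (ss_ne_nil c t)
        | cons h0 tl =>
          rw [hss] at h2
          have htl : tl ≠ [] := by
            intro hh
            simp [hh] at h2
          have e1 : ([] :: h0 :: tl : List (List Char)).dropLast = [] :: (h0 :: tl).dropLast :=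
            List.dropLast_cons_of_ne_nil (by simp)
          have e2 : (h0 :: tl : List (List Char)).dropLast = h0 :: tl.dropLast :=
            List.dropLast_cons_of_ne_nil htl
          rw [e1, e2, PySem.Chars.join_cons_cons, bl_cons_of_mem x hm, ← ih, hss, e2]
          simp [hxc]
      · rw [ss_of_not_mem hm, bl_concat_not_mem x hm]
        rfl
    · by_cases hm : c ∈ t
      · cases hss : ssC c t with
        | nil => exact absurd hss (ss_ne_nil c t)
        | cons h0 tl =>
          have h2 := two_le_ss hm
          rw [hss] at h2
          have htl : tl ≠ [] := by intro hh; simp [hh] at h2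
          simp only [ssC, if_neg hxc, hss, List.modifyHead]
          rw [List.dropLast_cons_of_ne_nil htl, join_cons_head]
          rw [bl_cons_of_mem x hm, ← ih]
          rw [hss, List.dropLast_cons_of_ne_nil htl]
      · have hmx : c ∉ x :: t := by
          intro hh
          rcases List.mem_cons.mp hh with h' | h'
          · exact hxc h'.symm
          · exact hm h'
        rw [ss_of_not_mem hmx, bl_of_not_mem hmx]
        rfl

lemma bl_prefix (c : Char) (s : List Char) : blC c s <+: s := by
  have h1 : (List.dropWhile (fun y => decide (y ≠ c)) s.reverse).tail <:+ s.reverse :=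
    (List.tail_suffix _).trans (List.dropWhile_suffix _)
  have h2 := List.reverse_prefix.mpr h1
  simpa [blC] using h2

lemma bl_length {c : Char} {s : List Char} (h : c ∈ s) :
    (blC c s).length = s.length - (s.reverse.takeWhile (fun x => x ≠ c)).length - 1 := by
  have hD : List.dropWhile (fun y => decide (y ≠ c)) s.reverse ≠ [] := by
    intro hh
    have := List.dropWhile_eq_nil_iff.mp hh c (List.mem_reverse.mpr h)
    simp at this
  have hsum := congrArg List.length (List.takeWhile_append_dropWhile (p := fun y => decide (y ≠ c)) (l := s.reverse))
  rw [List.length_append, List.length_reverse] at hsum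
  have hpos : 1 ≤ (List.dropWhile (fun y => decide (y ≠ c)) s.reverse).length := by
    cases hE : List.dropWhile (fun y => decide (y ≠ c)) s.reverse with
    | nil => exact absurd hE hD
    | cons a b => simp
  unfold blC
  rw [List.length_reverse, List.length_tail]
  omega

-- A's scope expression ")".join(x.split(")")[:-1]) is everything before the LAST ')' in x
lemma joinSplit_eq_bl (s : List Char) :
    PySem.Chars.join [')'] (PySem.List.slice (PySem.Chars.splitOn s [')']) none (some (-1))) = blC ')' s := by
  rw [PySem.List.slice_to_neg_one, splitOn_single, join_dropLast_ss]

lemma tw_lt {c : Char} {s : List Char} (h : c ∈ s) :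
    (s.takeWhile (fun x => x ≠ c)).length < s.length := by
  induction s with
  | nil => simp at h
  | cons x t ih =>
    by_cases hxc : x = c
    · simp [List.takeWhile_cons, hxc]
    · have hm : c ∈ t := by
        rcases List.mem_cons.mp h with h' | h'
        · exact absurd h'.symm hxc
        · exact h'
      simp only [List.takeWhile_cons, decide_eq_true_eq]
      rw [if_pos hxc]
      simpa using ih hm

lemma exists_split_first {c : Char} {s : List Char} (h : c ∈ s) :
    ∃ t, s = s.takeWhile (fun x => x ≠ c) ++ c :: t := by
  induction s with
  | nil => simp at h
  | cons x u ih =>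
    by_cases hxc : x = c
    · subst hxc
      exact ⟨u, by simp [List.takeWhile_cons]⟩
    · have hm : c ∈ u := by
        rcases List.mem_cons.mp h with h' | h'
        · exact absurd h'.symm hxc
        · exact h'
      obtain ⟨t, ht⟩ := ih hm
      refine ⟨t, ?_⟩
      simp only [List.takeWhile_cons, decide_eq_true_eq]
      rw [if_pos hxc]
      rw [List.cons_append]
      exact congrArg (x :: ·) ht

lemma tw_append_of_mem {c : Char} {a : List Char} (b : List Char) (h : c ∈ a) :
    (a ++ b).takeWhile (fun x => x ≠ c) = a.takeWhile (fun x => x ≠ c) := by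
  induction a with
  | nil => simp at h
  | cons x t ih =>
    by_cases hxc : x = c
    · simp [List.takeWhile_cons, hxc]
    · have hm : c ∈ t := by
        rcases List.mem_cons.mp h with h' | h'
        · exact absurd h'.symm hxc
        · exact h'
      simp only [List.cons_append, List.takeWhile_cons, decide_eq_true_eq]
      rw [if_pos hxc, if_pos hxc, ih hm]

lemma tw_append_of_not_mem {c : Char} {a : List Char} (b : List Char) (h : c ∉ a) :
    (a ++ b).takeWhile (fun x => x ≠ c) = a ++ b.takeWhile (fun x => x ≠ c) := by
  induction a with
  | nil => simp
  | cons x t ih =>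
    have hxc : ¬(x = c) := by rintro rfl; exact h (by simp)
    have hm : c ∉ t := fun hm => h (by simp [hm])
    simp only [List.cons_append, List.takeWhile_cons, decide_eq_true_eq]
    simp [hxc]
    simpa using ih hm

-- B's slice head[lp+1:rp] equals A's "everything before the last ')' after the first '('"
lemma scope_bridge (head : List Char) (hlp : PySem.Chars.find head ['('] ≠ -1) :
    PySem.Chars.strip (blC ')' (head.drop ((PySem.Chars.find head ['(']).toNat + 1))) =
      (if 0 ≤ PySem.Chars.find head ['('] ∧ PySem.Chars.find head ['('] < rfindB head ')' then
        PySem.Chars.strip ((head.drop ((PySem.Chars.find head ['(']).toNat + 1)).take ((rfindB head ')').toNat - ((PySem.Chars.find head ['(']).toNat + 1)))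
      else []) := by
  have hmem : '(' ∈ head := by
    by_contra hmm
    rw [find_single '(' head, if_neg hmm] at hlp
    exact hlp rfl
  have hfs : PySem.Chars.find head ['('] = ((head.takeWhile (fun x => x ≠ '(')).length : Int) := by
    rw [find_single '(' head, if_pos hmem]
  obtain ⟨tail, htail⟩ := exists_split_first hmem
  set TW := head.takeWhile (fun x => x ≠ '(') with hTW
  have hlp0 : (PySem.Chars.find head ['(']).toNat = TW.length := by rw [hfs]; simp
  have hdrop : head.drop ((PySem.Chars.find head ['(']).toNat + 1) = tail := by
    rw [hlp0, htail]
    rw [show TW.length + 1 = (TW ++ ['(']).length by simp]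
    rw [show TW ++ '(' :: tail = (TW ++ ['(']) ++ tail by simp]
    exact List.drop_left
  have hlen : head.length = TW.length + 1 + tail.length := by
    rw [htail]; simp; omega
  have hge : 0 ≤ PySem.Chars.find head ['('] := by rw [hfs]; positivity
  rw [hdrop]
  by_cases hrt : ')' ∈ tail
  · -- the last ')' of head lies in tail; the slice is exactly blC ')' tail
    have hrev : head.reverse = tail.reverse ++ ('(' :: TW.reverse) := by
      rw [htail]; simp
    have hrmem : ')' ∈ head.reverse := by
      rw [hrev]; exact List.mem_append_left _ (List.mem_reverse.mpr hrt)
    have htw_eq : head.reverse.takeWhile (fun x => x ≠ ')') = tail.reverse.takeWhile (fun x => x ≠ ')') := by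
      rw [hrev]; exact tw_append_of_mem _ (List.mem_reverse.mpr hrt)
    have hrfind : PySem.Chars.find head.reverse [')'] = ((tail.reverse.takeWhile (fun x => x ≠ ')')).length : Int) := by
      rw [find_single ')' head.reverse, if_pos hrmem, htw_eq]
    set twt := (tail.reverse.takeWhile (fun x => x ≠ ')')).length with htwt
    have htwlt : twt < tail.length := by
      have h := tw_lt (s := tail.reverse) (List.mem_reverse.mpr hrt)
      rw [List.length_reverse] at h
      exact h
    have hrne : ¬(PySem.Chars.find head.reverse [')'] = -1) := by rw [hrfind]; omega
    have hrp : rfindB head ')' = (head.length : Int) - 1 - twt := by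
      simp only [rfindB]
      rw [hrfind, if_neg (by omega)]
    have hcond : 0 ≤ PySem.Chars.find head ['('] ∧ PySem.Chars.find head ['('] < rfindB head ')' := by
      constructor
      · exact hge
      · rw [hfs, hrp, hlen]
        push_cast
        omega
    rw [if_pos hcond]
    have hbl_len : (blC ')' tail).length = tail.length - twt - 1 := bl_length hrt
    have htake_len : (rfindB head ')').toNat - ((PySem.Chars.find head ['(']).toNat + 1) = (blC ')' tail).length := by
      rw [hrp, hlp0, hbl_len, hlen]
      omega
    rw [htake_len, ← List.prefix_iff_eq_take.mp (bl_prefix ')' tail)]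
  · -- no ')' after the first '(': A's scope is empty and B's guard fails
    have hbl : blC ')' tail = [] := bl_of_not_mem hrt
    have hcond : ¬(0 ≤ PySem.Chars.find head ['('] ∧ PySem.Chars.find head ['('] < rfindB head ')') := by
      rintro ⟨-, hlt⟩
      by_cases hrh : ')' ∈ head.reverse
      · have hrev : head.reverse = tail.reverse ++ ('(' :: TW.reverse) := by
          rw [htail]; simp
        have hnt : ')' ∉ tail.reverse := fun hh => hrt (List.mem_reverse.mp hh)
        have htw_eq : head.reverse.takeWhile (fun x => x ≠ ')') =
            tail.reverse ++ ('(' :: TW.reverse).takeWhile (fun x => x ≠ ')') := by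
          rw [hrev]; exact tw_append_of_not_mem _ hnt
        have htwlen : tail.length ≤ (head.reverse.takeWhile (fun x => x ≠ ')')).length := by
          rw [htw_eq]; simp
        have hrfind : PySem.Chars.find head.reverse [')'] = ((head.reverse.takeWhile (fun x => x ≠ ')')).length : Int) := by
          rw [find_single ')' head.reverse, if_pos hrh]
        have hrp : rfindB head ')' ≤ (head.length : Int) - 1 - tail.length := by
          have h1 : rfindB head ')' = (head.length : Int) - 1 - ((head.reverse.takeWhile (fun x => x ≠ ')')).length : Int) := by
            simp only [rfindB]
            rw [hrfind, if_neg (by omega)]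
          rw [h1]
          omega
        rw [hfs] at hlt
        rw [hlen] at hrp
        push_cast at hrp
        omega
      · have hrfind : PySem.Chars.find head.reverse [')'] = -1 := by
          rw [find_single ')' head.reverse, if_neg hrh]
        have : rfindB head ')' = -1 := by simp only [rfindB]; rw [hrfind]; simp
        omega
    rw [if_neg hcond, hbl]
    rfl

-- ---- footer loop equivalence ----

-- proof-side form of footA: structural recursion over the reversed list of lines
def recA : List (List Char) → List (List Char) × List (List Char) → List (List Char) × List (List Char)
  | [], st => st
  | line :: rest, st =>
    let footer_line := PySem.Chars.strip line
    if footer_line.length = 0 then recA rest st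
    else
      let footer := PySem.Chars.splitOnMax footer_line [':', ' '] 1
      if footer.length = 1 then st
      else
        let name := PySem.Chars.lower (PySem.Chars.strip (PySem.List.pyGetD footer 0 []))
        if name = ['r','e','f','s'] ∨ name = ['c','l','o','s','e','s'] then
          let items := (PySem.Chars.splitOn (PySem.List.pyGetD footer 1 []) [',']).map PySem.Chars.strip
          if name = ['r','e','f','s'] then recA rest (items ++ st.1, st.2)
          else recA rest (st.1, items ++ st.2)
        else recA rest st

lemma footA_eq_recA (lines : List (List Char)) : ∀ (n : Nat), n ≤ lines.length → ∀ st,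
    footA lines (PySem.List.pyRange (n : Int) 0 (-1)) st = recA ((lines.take n).reverse) st := by
  intro n
  induction n with
  | zero =>
    intro _ st
    rw [PySem.List.pyRange_neg_one_eq_nil (by omega)]
    simp [footA, recA]
  | succ k ih =>
    intro hle st
    have hk : k < lines.length := by omega
    rw [PySem.List.pyRange_neg_one_cons (by push_cast; omega : (0 : Int) < ((k + 1 : Nat) : Int))]
    have hsub : (((k + 1 : Nat)) : Int) - 1 = ((k : Nat) : Int) := by push_cast; ring
    have htake : (lines.take (k + 1)).reverse = lines[k] :: (lines.take k).reverse := by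
      rw [List.take_succ, List.getElem?_eq_getElem hk]
      simp
    rw [htake]
    simp only [footA, recA, hsub, PySem.List.pyGetD_natCast]
    have hgetd : lines.getD k [] = lines[k] := by
      simp [List.getD, List.getElem?_eq_getElem hk]
    rw [hgetd]
    split_ifs <;> first | rfl | exact ih (by omega) _

-- recA threads its initial state untouched on the right of what it accumulates
lemma recA_state : ∀ (rls : List (List Char)) (r0 c0 : List (List Char)),
    recA rls (r0, c0) = ((recA rls ([], [])).1 ++ r0, (recA rls ([], [])).2 ++ c0) := by
  intro rls
  induction rls with
  | nil => intro r0 c0; simp [recA]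
  | cons line rest ih =>
    intro r0 c0
    simp only [recA]
    split_ifs with h1 h2 h3 h4
    · exact ih r0 c0
    · simp
    · rw [ih _ _, ih ((PySem.Chars.splitOn (PySem.List.pyGetD (PySem.Chars.splitOnMax (PySem.Chars.strip line) [':', ' '] 1) 1 []) [',']).map PySem.Chars.strip ++ []) []]
      simp
    · rw [ih _ _, ih [] ((PySem.Chars.splitOn (PySem.List.pyGetD (PySem.Chars.splitOnMax (PySem.Chars.strip line) [':', ' '] 1) 1 []) [',']).map PySem.Chars.strip ++ [])]
      simp
    · exact ih r0 c0

lemma getD_single0 (a : List Char) : PySem.List.pyGetD [a] 0 [] = a := by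
  simp [PySem.List.pyGetD_zero]

lemma getD_pair0 (a b : List Char) : PySem.List.pyGetD [a, b] 0 [] = a := by
  simp [PySem.List.pyGetD_zero]

lemma getD_pair1 (a b : List Char) : PySem.List.pyGetD [a, b] 1 [] = b := by
  simp [pysem]

-- B's forward reset fold computes exactly the reverse break loop's result
lemma fwd_eq (ls : List (List Char)) : ls.foldl stepF ([], []) = recA ls.reverse ([], []) := by
  induction ls using List.reverseRecOn with
  | nil => simp [recA]
  | append_singleton ls a ih =>
    rw [List.foldl_append, List.reverse_append]
    simp only [List.foldl_cons, List.foldl_nil, List.reverse_cons, List.reverse_nil, List.nil_append, List.singleton_append]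
    set prev := ls.foldl stepF ([], []) with hprev
    show stepF prev a = recA (a :: ls.reverse) (([], []) : List (List Char) × List (List Char))
    simp only [stepF, recA]
    by_cases h1 : (PySem.Chars.strip a).length = 0
    · rw [if_pos h1, if_pos h1, ← ih, hprev]
    · rw [if_neg h1, if_neg h1]
      have hge := PySem.Chars.neg_one_le_find (PySem.Chars.strip a) [':', ' ']
      by_cases hf : PySem.Chars.find (PySem.Chars.strip a) [':', ' '] = -1
      · have hlen : (PySem.Chars.splitOnMax (PySem.Chars.strip a) [':', ' '] 1).length = 1 := by
          rw [split1_eq _ _ (by simp), if_pos hf]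
          rfl
        rw [if_pos (by omega : PySem.Chars.find (PySem.Chars.strip a) [':', ' '] < 0), if_pos hlen]
      · have hsp := split1_eq (PySem.Chars.strip a) [':', ' '] (by simp)
        rw [if_neg hf] at hsp
        have hlen : ¬((PySem.Chars.splitOnMax (PySem.Chars.strip a) [':', ' '] 1).length = 1) := by
          rw [hsp]; simp
        rw [if_neg (by omega : ¬(PySem.Chars.find (PySem.Chars.strip a) [':', ' '] < 0)), if_neg hlen]
        simp only [hsp, getD_pair0, getD_pair1]
        have hdlen : ((PySem.Chars.strip a).drop ((PySem.Chars.find (PySem.Chars.strip a) [':', ' ']).toNat + ([':', ' '] : List Char).length)) = ((PySem.Chars.strip a).drop ((PySem.Chars.find (PySem.Chars.strip a) [':', ' ']).toNat + 2)) := by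
          norm_num
        rw [hdlen]
        set name := PySem.Chars.lower (PySem.Chars.strip ((PySem.Chars.strip a).take (PySem.Chars.find (PySem.Chars.strip a) [':', ' ']).toNat)) with hname
        set items := (PySem.Chars.splitOn ((PySem.Chars.strip a).drop ((PySem.Chars.find (PySem.Chars.strip a) [':', ' ']).toNat + 2)) [',']).map PySem.Chars.strip with hitems
        by_cases hn1 : name = ['r','e','f','s']
        · rw [if_pos hn1, if_pos (Or.inl hn1), if_pos hn1, recA_state]
          rw [← ih, hprev]
          simp
        · rw [if_neg hn1, if_neg hn1]
          by_cases hn2 : name = ['c','l','o','s','e','s']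
          · rw [if_pos hn2, if_pos (Or.inr hn2), recA_state]
            rw [← ih, hprev]
            simp
          · rw [if_neg hn2, if_neg (by simp [hn1, hn2]), ← ih, hprev]

lemma loop_eq (lines : List (List Char)) :
    footA lines (PySem.List.pyRange (lines.length : Int) 0 (-1)) ([], []) = lines.foldl stepF ([], []) := by
  rw [footA_eq_recA lines lines.length (le_refl _), List.take_length, fwd_eq]

-- the body/breaking/footer part of both programs agree once the subject pieces agree
lemma tail_eq (hash short_hash : String) (ctypeA ctypeB scopeA scopeB summary bod : List Char) (is_b : Bool)
    (hct : PySem.Chars.strip ctypeA = PySem.Chars.strip ctypeB) (hsc : scopeA = scopeB) :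
    (let body2 := PySem.Chars.splitOnMax (PySem.Chars.strip bod) ['B','R','E','A','K','I','N','G',' ','C','H','A','N','G','E',':'] 1
     let breaking_change : Option (List String) :=
       if 1 < body2.length then
         some ((PySem.Chars.splitOn (PySem.Chars.strip (PySem.List.pyGetD body2 1 [])) ['\n','\n']).map (fun p => String.ofList (PySem.Chars.strip p)))
       else none
     let lines := PySem.Chars.splitOn (PySem.Chars.strip (PySem.List.pyGetD body2 0 [])) ['\n']
     let rc := footA lines (PySem.List.pyRange (lines.length : Int) 0 (-1)) ([], [])
     let references : PySem.Dict String (List String) := PySem.Dict.empty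
     let references := if rc.1.length ≠ 0 then references.insert "references" (rc.1.map String.ofList) else references
     let references := if rc.2.length ≠ 0 then references.insert "closes" (rc.2.map String.ofList) else references
     some (String.ofList (PySem.Chars.strip ctypeA), String.ofList scopeA, String.ofList summary,
           hash, short_hash, is_b, breaking_change, references.items)) =
    (let bc := PySem.Chars.strip bod
     let k := PySem.Chars.find bc ['B','R','E','A','K','I','N','G',' ','C','H','A','N','G','E',':']
     let breaking_change : Option (List String) :=
       if k < 0 then none
       else some ((PySem.Chars.splitOn (PySem.Chars.strip (bc.drop (k.toNat + 16))) ['\n','\n']).map (fun p => String.ofList (PySem.Chars.strip p)))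
     let pre := if k < 0 then bc else bc.take k.toNat
     let rc := (PySem.Chars.splitOn (PySem.Chars.strip pre) ['\n']).foldl stepF ([], [])
     let references : PySem.Dict String (List String) := PySem.Dict.empty
     let references := if rc.1.length ≠ 0 then references.insert "references" (rc.1.map String.ofList) else references
     let references := if rc.2.length ≠ 0 then references.insert "closes" (rc.2.map String.ofList) else references
     some (String.ofList (PySem.Chars.strip ctypeB), String.ofList scopeB, String.ofList summary,
           hash, short_hash, is_b, breaking_change, references.items)) := by
  have hge := PySem.Chars.neg_one_le_find (PySem.Chars.strip bod) ['B','R','E','A','K','I','N','G',' ','C','H','A','N','G','E',':']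
  rw [split1_eq _ _ (by simp)]
  by_cases hbb : PySem.Chars.find (PySem.Chars.strip bod) ['B','R','E','A','K','I','N','G',' ','C','H','A','N','G','E',':'] = -1
  · rw [if_pos hbb]
    simp only [getD_single0, List.length_singleton]
    rw [if_neg (by omega), if_pos (by omega : PySem.Chars.find (PySem.Chars.strip bod) ['B','R','E','A','K','I','N','G',' ','C','H','A','N','G','E',':'] < 0), if_pos (by omega : PySem.Chars.find (PySem.Chars.strip bod) ['B','R','E','A','K','I','N','G',' ','C','H','A','N','G','E',':'] < 0)]
    rw [loop_eq, hct, hsc]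
  · rw [if_neg hbb]
    have hL : ((['B','R','E','A','K','I','N','G',' ','C','H','A','N','G','E',':'] : List Char)).length = 16 := by norm_num
    rw [hL]
    simp only [getD_pair0, getD_pair1]
    rw [if_pos (by norm_num : 1 < ([PySem.Chars.strip bod |>.take (PySem.Chars.find (PySem.Chars.strip bod) ['B','R','E','A','K','I','N','G',' ','C','H','A','N','G','E',':']).toNat, PySem.Chars.strip bod |>.drop ((PySem.Chars.find (PySem.Chars.strip bod) ['B','R','E','A','K','I','N','G',' ','C','H','A','N','G','E',':']).toNat + 16)] : List (List Char)).length)]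
    rw [if_neg (by omega : ¬ PySem.Chars.find (PySem.Chars.strip bod) ['B','R','E','A','K','I','N','G',' ','C','H','A','N','G','E',':'] < 0), if_neg (by omega : ¬ PySem.Chars.find (PySem.Chars.strip bod) ['B','R','E','A','K','I','N','G',' ','C','H','A','N','G','E',':'] < 0)]
    rw [loop_eq, hct, hsc]

-- ===== VERDICT (by name: the statement is the Claim_ definition above) =====
theorem get_commit_spec : Claim_equal_get_commit := by
  unfold Claim_equal_get_commit
  intro hash short_hash message _hdom
  unfold Spec_get_commit
  simp only [get_commit, get_commit_alt]
  have hnn : (['\n','\n'] : List Char) ≠ [] := by simp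
  have h0 : PySem.Chars.find (message.toList ++ ['\n','\n']) ['\n','\n'] ≠ -1 := find_append_sep message.toList ['\n','\n'] hnn
  rw [split1_eq (message.toList ++ ['\n','\n']) ['\n','\n'] hnn, if_neg h0]
  set text := message.toList ++ ['\n','\n'] with htext
  set nl := PySem.Chars.find text ['\n','\n'] with hnl
  simp only [getD_pair0, getD_pair1]
  have hlen2 : ((['\n','\n'] : List Char)).length = 2 := by norm_num
  rw [hlen2]
  set subject := text.take nl.toNat with hsubject
  set bod := text.drop (nl.toNat + 2) with hbod
  have hsge := PySem.Chars.neg_one_le_find subject [':', ' ']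
  rw [split1_eq subject [':', ' '] (by simp)]
  by_cases hsub : PySem.Chars.find subject [':', ' '] = -1
  · rw [if_pos hsub, if_pos (by omega : PySem.Chars.find subject [':', ' '] < 0)]
    simp
  · rw [if_neg hsub, if_neg (by omega : ¬ PySem.Chars.find subject [':', ' '] < 0)]
    set sep := PySem.Chars.find subject [':', ' '] with hsep
    rw [if_neg (by simp : ¬(([subject.take sep.toNat, subject.drop (sep.toNat + ([':', ' '] : List Char).length)] : List (List Char)).length ≠ 2))]
    simp only [getD_pair0, getD_pair1]
    have hl2 : (([':', ' '] : List Char)).length = 2 := by norm_num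
    rw [hl2]
    set head0 := PySem.Chars.strip (subject.take sep.toNat) with hhead0
    set summary := subject.drop (sep.toNat + 2) with hsummary
    rw [breaking_eq head0]
    set is_b := PySem.Chars.endswith head0 ['!'] with hisb
    set head := (if is_b = true then PySem.Chars.rstrip (PySem.List.slice head0 none (some (-1))) else head0) with hhead
    have hhge := PySem.Chars.neg_one_le_find head ['(']
    rw [split1_eq head ['('] (by simp)]
    by_cases hlp : PySem.Chars.find head ['('] = -1
    · rw [if_pos hlp, if_pos (by omega : PySem.Chars.find head ['('] < 0)]
      simp only [getD_single0]
      rw [if_neg (by simp : ¬(([head] : List (List Char)).length = 2))]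
      rw [if_neg (by rintro ⟨h1, -⟩; omega : ¬(0 ≤ PySem.Chars.find head ['('] ∧ PySem.Chars.find head ['('] < rfindB head ')'))]
      by_cases hct : head.length = 0
      · rw [if_pos hct, if_pos hct]
      · rw [if_neg hct, if_neg hct]
        exact tail_eq hash short_hash head head [] [] summary bod is_b rfl rfl
    · rw [if_neg hlp, if_neg (by omega : ¬ PySem.Chars.find head ['('] < 0)]
      set lp := PySem.Chars.find head ['('] with hlpdef
      simp only [getD_pair0, getD_pair1]
      have hl1 : ((['('] : List Char)).length = 1 := by norm_num
      rw [hl1]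
      rw [if_pos (by simp : (([head.take lp.toNat, head.drop (lp.toNat + 1)] : List (List Char)).length = 2))]
      by_cases hct : (head.take lp.toNat).length = 0
      · rw [if_pos hct, if_pos hct]
      · rw [if_neg hct, if_neg hct]
        have hsc : PySem.Chars.strip (PySem.Chars.join [')'] (PySem.List.slice (PySem.Chars.splitOn (head.drop (lp.toNat + 1)) [')']) none (some (-1)))) =
            (if 0 ≤ lp ∧ lp < rfindB head ')' then
              PySem.Chars.strip ((head.drop (lp.toNat + 1)).take ((rfindB head ')').toNat - (lp.toNat + 1))) else []) := by
          rw [joinSplit_eq_bl]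
          rw [hlpdef]
          exact scope_bridge head hlp
        exact tail_eq hash short_hash (head.take lp.toNat) (head.take lp.toNat) _ _ summary bod is_b rfl hsc
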